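-- pv_equiv track=rewrite | github.com/mayankgulaty/mini-python-projects | years.py | solution
-- ===== SOURCE A (Python) =====
-- def solution(years):
--     count=0
--     for i in range(0,len(years)-1):
--         if years[i]==years[i+1]:
--             continue
--         elif years[i]<years[i+1]:
--             count+=1
--         elif years[i]>years[i+1]:
--             count+=2
--
--     return count
-- ===== SOURCE B (Python) =====
-- def solution(years):
--     # Stage 1: collapse runs of equal adjacent values (equal pairs contribute nothing).
--     runs = []
--     for y in years:
--         if not runs or runs[-1] != y:
--             runs.append(y)
--     if not runs:
--         return 0
--     # Stage 2: every change of value costs 1, and a descent costs 1 extra.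
--     descents = sum(1 for a, b in zip(runs, runs[1:]) if a > b)
--     return (len(runs) - 1) + descents
-- ===== Notes on version B (the rewrite author's own statement) =====
-- stated objective: alternative
-- what changed: B first run-length-compresses the list so equal adjacent pairs disappear structurally, then computes (number of runs - 1) + (number of descents between consecutive run values), instead of A's single index loop with a branching 0/1/2 weight accumulator.
import Mathlib
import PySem

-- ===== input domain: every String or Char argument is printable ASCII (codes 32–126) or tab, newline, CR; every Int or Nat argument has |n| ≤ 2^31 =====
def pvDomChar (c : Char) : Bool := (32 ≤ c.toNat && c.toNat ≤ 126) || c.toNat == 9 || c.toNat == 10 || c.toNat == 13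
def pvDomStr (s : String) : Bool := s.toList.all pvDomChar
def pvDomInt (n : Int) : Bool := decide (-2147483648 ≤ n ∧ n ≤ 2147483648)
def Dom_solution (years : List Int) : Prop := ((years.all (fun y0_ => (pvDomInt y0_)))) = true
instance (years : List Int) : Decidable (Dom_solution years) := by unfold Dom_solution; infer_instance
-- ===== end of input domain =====

-- B run-length-compresses the list (equal adjacent pairs vanish), then returns
-- (number of runs - 1) + (number of descents between consecutive run values):
-- an alternative staged decomposition of A's branching 0/1/2 accumulator loop.

-- ===== PORT A =====
def solution (years : List Int) : Int :=
  (PySem.List.pyRange 0 ((years.length : Int) - 1) 1).foldl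
    (fun count i =>
      if PySem.List.pyGetD years i 0 = PySem.List.pyGetD years (i + 1) 0 then count
      else if PySem.List.pyGetD years i 0 < PySem.List.pyGetD years (i + 1) 0 then count + 1
      else if PySem.List.pyGetD years i 0 > PySem.List.pyGetD years (i + 1) 0 then count + 2
      else count) 0

-- ===== PORT B =====
def solution_alt (years : List Int) : Int :=
  let runs := years.foldl (fun rs y => if rs = [] ∨ rs.getLast? ≠ some y then rs ++ [y] else rs) []
  if runs = [] then 0
  else ((runs.length : Int) - 1)
        + (((runs.zip runs.tail).filter (fun p => p.1 > p.2)).length : Int)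

-- ===== PRECONDITION & SPEC =====
def Spec_solution (years : List Int) (out : Int) : Prop := out = solution_alt years
instance (years : List Int) (out : Int) : Decidable (Spec_solution years out) := by unfold Spec_solution; infer_instance

-- ===== CLAIM (what is proved, stated in full; the proofs are below) =====
def Claim_equal_solution : Prop := ∀ (years : List Int), Dom_solution years → Spec_solution years (solution years)

-- ===== LEMMAS AND PROOFS =====

-- weight of one adjacent pair, as A counts it
def pvW (a b : Int) : Int := if a = b then 0 else if a < b then 1 else if a > b then 2 else 0

-- A's fold as a sum over natural indices
def pvS (years : List Int) : Int :=
  ((List.range (years.length - 1)).map (fun k => pvW (years.getD k 0) (years.getD (k + 1) 0))).sum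

theorem solution_eq_pvS (years : List Int) : solution years = pvS years := by
  unfold solution pvS
  have hf : (fun (count i : Int) =>
      if PySem.List.pyGetD years i 0 = PySem.List.pyGetD years (i + 1) 0 then count
      else if PySem.List.pyGetD years i 0 < PySem.List.pyGetD years (i + 1) 0 then count + 1
      else if PySem.List.pyGetD years i 0 > PySem.List.pyGetD years (i + 1) 0 then count + 2
      else count)
      = fun count i => count + pvW (PySem.List.pyGetD years i 0) (PySem.List.pyGetD years (i + 1) 0) := by
    funext c i
    simp only [pvW]
    split_ifs <;> omega
  rw [hf, PySem.List.foldl_add, PySem.List.pyRange_one]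
  simp only [zero_add, List.map_map]
  have hlen : (((years.length : Int) - 1) - 0).toNat = years.length - 1 := by omega
  rw [hlen]
  congr 1
  apply List.map_congr_left
  intro k _
  simp only [Function.comp]
  have h1 : PySem.List.pyGetD years (k : Int) 0 = years.getD k 0 := PySem.List.pyGetD_natCast years k 0
  have h2 : PySem.List.pyGetD years ((k : Int) + 1) 0 = years.getD (k + 1) 0 := by
    have : ((k : Int) + 1) = ((k + 1 : Nat) : Int) := by push_cast; ring
    rw [this, PySem.List.pyGetD_natCast]
  rw [h1, h2]

theorem pvS_cons (x y : Int) (t : List Int) :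
    pvS (x :: y :: t) = pvW x y + pvS (y :: t) := by
  unfold pvS
  simp only [List.length_cons]
  have : (t.length + 1 + 1) - 1 = (t.length + 1 - 1) + 1 := by omega
  rw [this, List.range_succ_eq_map]
  simp only [List.map_cons, List.map_map, List.sum_cons]
  have hhead : (x :: y :: t).getD 0 0 = x := rfl
  have hhead1 : (x :: y :: t).getD (0 + 1) 0 = y := rfl
  rw [hhead, hhead1]
  congr 1

-- run compression of the tail, keyed on the last kept value
def pvG (l : Int) : List Int → List Int
  | [] => []
  | y :: t => if y = l then pvG l t else y :: pvG y t

-- B's foldl builds acc ++ pvG (last of acc)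
theorem pvFoldl_runs (t : List Int) : ∀ (acc : List Int) (l : Int), acc.getLast? = some l →
    t.foldl (fun rs y => if rs = [] ∨ rs.getLast? ≠ some y then rs ++ [y] else rs) acc
      = acc ++ pvG l t := by
  induction t with
  | nil => intro acc l _; simp [pvG]
  | cons y t ih =>
    intro acc l hl
    have hacc : acc ≠ [] := by intro h; simp [h] at hl
    simp only [List.foldl_cons, pvG]
    by_cases hyl : y = l
    · have : ¬ (acc = [] ∨ acc.getLast? ≠ some y) := by
        push_neg; exact ⟨hacc, by rw [hl, hyl]⟩
      rw [if_neg this, if_pos hyl, ih acc l hl]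
    · have : acc = [] ∨ acc.getLast? ≠ some y := by
        right; rw [hl]; simp [Ne.symm hyl]
      rw [if_pos this, if_neg hyl, ih (acc ++ [y]) y (by simp)]
      simp

-- B's value on a nonempty run list, as a function of the run list
def pvF (rs : List Int) : Int :=
  ((rs.length : Int) - 1) + (((rs.zip rs.tail).filter (fun p => p.1 > p.2)).length : Int)

theorem pvMain (t : List Int) : ∀ x : Int, pvS (x :: t) = pvF (x :: pvG x t) := by
  induction t with
  | nil => intro x; simp [pvS, pvG, pvF]
  | cons y t ih =>
    intro x
    rw [pvS_cons]
    by_cases hxy : y = x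
    · subst hxy
      have : pvW y y = 0 := by simp [pvW]
      rw [this, zero_add, ih y]
      simp [pvG]
    · have hg : pvG x (y :: t) = y :: pvG y t := by simp [pvG, hxy]
      rw [hg, ih y]
      have hW : pvW x y = 1 + (if x > y then (1 : Int) else 0) := by
        unfold pvW
        rcases lt_trichotomy x y with h | h | h
        · simp [h, ne_of_lt h, not_lt.mpr (le_of_lt h)]
        · exact absurd h.symm hxy
        · simp [h, (Ne.symm hxy), not_lt.mpr (le_of_lt h)]
      unfold pvF
      simp only [List.zip_cons_cons, List.tail_cons, List.filter_cons, List.length_cons]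
      rw [hW]
      split_ifs <;> simp_all <;> push_cast <;> omega

-- ===== VERDICT (by name: the statement is the Claim_ definition above) =====
theorem solution_spec : Claim_equal_solution := by
  intro years _
  unfold Spec_solution solution_alt
  rw [solution_eq_pvS]
  cases years with
  | nil => simp [pvS]
  | cons x t =>
    have h0 : ([] : List Int).foldl (fun rs y => if rs = [] ∨ rs.getLast? ≠ some y then rs ++ [y] else rs) [] = [] := rfl
    have hruns : (x :: t).foldl (fun rs y => if rs = [] ∨ rs.getLast? ≠ some y then rs ++ [y] else rs) []
        = x :: pvG x t := by
      simp only [List.foldl_cons]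
      have h1 : (if True ∨ ([] : List Int).getLast? ≠ some x then ([] : List Int) ++ [x] else []) = [x] := by simp
      rw [h1]
      exact pvFoldl_runs t [x] x rfl
    simp only [hruns]
    rw [if_neg (by simp)]
    exact pvMain t x
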